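-- pv_equiv track=rewrite | github.com/sin6708k/Algorithms | divide_and_conquer/sorting_ages.py | solution
-- ===== SOURCE A (Python) =====
-- def solution(N: int, all_members: list[tuple[int, str]]):
--     def merge(left_members: list[tuple[int, str]],
--               right_members: list[tuple[int, str]]) -> list[tuple[int, str]]:
--         i = 0
--         j = 0
--         nums = []
--
--         while True:
--             if i == len(left_members):
--                 nums.extend(right_members[j:])
--                 break
--             if j == len(right_members):
--                 nums.extend(left_members[i:])
--                 break
--
--             if left_members[i][0] <= right_members[j][0]:
--                 nums.append(left_members[i])
--                 i += 1
--             else: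
--                 nums.append(right_members[j])
--                 j += 1
--         return nums
--
--     def sort(members: list[tuple[int, str]]) -> list[tuple[int, str]]:
--         if len(members) == 1:
--             return members
--
--         mid = len(members) // 2
--         return merge(sort(members[:mid]), sort(members[mid:]))
--
--     # BEGIN
--     return '\n'.join(' '.join(map(str, member))
--                      for member in sort(all_members))
-- ===== SOURCE B (Python) =====
-- def solution(N, all_members):
--     return '\n'.join(' '.join(map(str, member))
--                      for member in sorted(all_members, key=lambda m: m[0]))
-- ===== Notes on version B (the rewrite author's own statement) =====
-- stated objective: idiomatic
-- what changed: Replaces the hand-written top-down recursive merge sort with Python's built-in stable sorted(key=age); formatting is unchanged.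
import Mathlib
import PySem

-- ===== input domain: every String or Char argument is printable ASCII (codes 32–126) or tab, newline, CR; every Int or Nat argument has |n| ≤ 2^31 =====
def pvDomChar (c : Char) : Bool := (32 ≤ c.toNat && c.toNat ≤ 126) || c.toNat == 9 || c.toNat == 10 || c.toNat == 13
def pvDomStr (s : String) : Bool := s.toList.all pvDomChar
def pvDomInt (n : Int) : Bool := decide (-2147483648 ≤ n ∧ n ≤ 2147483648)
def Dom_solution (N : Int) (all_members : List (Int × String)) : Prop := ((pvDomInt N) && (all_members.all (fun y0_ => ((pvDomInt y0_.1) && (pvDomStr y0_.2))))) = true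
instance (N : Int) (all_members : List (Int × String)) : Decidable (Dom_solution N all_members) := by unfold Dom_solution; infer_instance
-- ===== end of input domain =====

-- B replaces A's hand-written recursive merge sort by Python's built-in stable sorted(key=age); same formatting, same output on nonempty input.


-- ===== PORT A =====
-- A's merge: while loop that appends the smaller head (left on ties), then extends with the exhausted side's remainder.
def mergeA : List (Int × String) → List (Int × String) → List (Int × String)
  | [], right => right
  | left, [] => left
  | a :: l, b :: r =>
      if a.1 ≤ b.1 then a :: mergeA l (b :: r) else b :: mergeA (a :: l) r
termination_by l r => l.length + r.length

-- A's sort: top-down recursion on halves; Python recurses forever on [] (fuel 0 is never reached on the inputs Pre_ admits).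
def sortA : Nat → List (Int × String) → List (Int × String)
  | 0, ms => ms
  | fuel + 1, ms =>
      if ms.length = 1 then ms
      else mergeA (sortA fuel (ms.take (ms.length / 2))) (sortA fuel (ms.drop (ms.length / 2)))

def solution (N : Int) (all_members : List (Int × String)) : String :=
  PySem.Str.join "\n" ((sortA all_members.length all_members).map
    (fun member => PySem.Str.join " " [PySem.Int.toStr member.1, member.2]))

-- ===== PORT B =====
def solution_alt (N : Int) (all_members : List (Int × String)) : String :=
  PySem.Str.join "\n" ((PySem.List.sorted all_members (fun m => m.1)).map
    (fun member => PySem.Str.join " " [PySem.Int.toStr member.1, member.2]))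

-- ===== PRECONDITION & SPEC =====
-- Pre_ excludes only the empty list, on which A's sort() never terminates (RecursionError).
def Pre_solution (N : Int) (all_members : List (Int × String)) : Prop := all_members ≠ []
instance (N : Int) (all_members : List (Int × String)) : Decidable (Pre_solution N all_members) := by unfold Pre_solution; infer_instance
def pvWitness_solution : Int × (List (Int × String)) := (0, [(1, "a")])

def Spec_solution (N : Int) (all_members : List (Int × String)) (out : String) : Prop := out = solution_alt N all_members
instance (N : Int) (all_members : List (Int × String)) (out : String) : Decidable (Spec_solution N all_members out) := by unfold Spec_solution; infer_instance

-- ===== CLAIM (what is proved, stated in full; the proofs are below) =====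
def Claim_equal_solution : Prop := ∀ (N : Int) (all_members : List (Int × String)), Dom_solution N all_members → Pre_solution N all_members → Spec_solution N all_members (solution N all_members)

-- ===== LEMMAS AND PROOFS =====

theorem mergeA_nil_right (as : List (Int × String)) : mergeA as [] = as := by
  cases as <;> simp [mergeA]

-- Merging after inserting y on the right equals inserting y into the merge (left bias of mergeA vs "after equals" of insertBy agree).
theorem mergeA_insertBy (y : Int × String) :
    ∀ (as bs : List (Int × String)),
      mergeA as (PySem.List.insertBy (fun a b => decide (a.1 < b.1)) y bs)
        = PySem.List.insertBy (fun a b => decide (a.1 < b.1)) y (mergeA as bs) := by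
  intro as
  induction as with
  | nil => intro bs; simp [mergeA]
  | cons a as iha =>
    intro bs
    induction bs with
    | nil =>
      simp only [PySem.List.insertBy, mergeA_nil_right]
      by_cases hay : a.1 ≤ y.1
      · have h1 : ¬ y.1 < a.1 := not_lt.mpr hay
        have := iha []
        simp only [PySem.List.insertBy, mergeA_nil_right] at this
        simp [mergeA, hay, h1, this, PySem.List.insertBy]
      · have h1 : y.1 < a.1 := lt_of_not_ge hay
        simp [mergeA, hay, h1, mergeA_nil_right, PySem.List.insertBy]
    | cons b bs ihb =>
      by_cases hyb : y.1 < b.1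
      · have hins : PySem.List.insertBy (fun a b => decide (a.1 < b.1)) y (b :: bs)
            = y :: b :: bs := by simp [PySem.List.insertBy, hyb]
        rw [hins]
        by_cases hay : a.1 ≤ y.1
        · have hab : a.1 ≤ b.1 := le_of_lt (lt_of_le_of_lt hay hyb)
          have h1 : ¬ y.1 < a.1 := not_lt.mpr hay
          have := iha (b :: bs)
          rw [hins] at this
          simp [mergeA, hay, hab, this, PySem.List.insertBy, h1]
        · have h1 : y.1 < a.1 := lt_of_not_ge hay
          by_cases hab : a.1 ≤ b.1 <;>
            simp [mergeA, hay, hab, PySem.List.insertBy, h1, hyb]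
      · have hins : PySem.List.insertBy (fun a b => decide (a.1 < b.1)) y (b :: bs)
            = b :: PySem.List.insertBy (fun a b => decide (a.1 < b.1)) y bs := by
          simp [PySem.List.insertBy, hyb]
        rw [hins]
        by_cases hab : a.1 ≤ b.1
        · have h1 : ¬ y.1 < a.1 := not_lt.mpr (le_trans hab (not_lt.mp hyb))
          have := iha (b :: bs)
          rw [hins] at this
          simp [mergeA, hab, PySem.List.insertBy, h1, this]
        · simp [mergeA, hab, PySem.List.insertBy, hyb, ihb]

theorem sorted_append_singleton (l : List (Int × String)) (y : Int × String) :
    PySem.List.sorted (l ++ [y]) (fun m => m.1)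
      = PySem.List.insertBy (fun a b => decide (a.1 < b.1)) y (PySem.List.sorted l (fun m => m.1)) := by
  simp [PySem.List.sorted_eq_foldl_insertBy, List.foldl_append]

theorem mergeA_sorted (ys xs : List (Int × String)) :
    mergeA (PySem.List.sorted xs (fun m => m.1)) (PySem.List.sorted ys (fun m => m.1))
      = PySem.List.sorted (xs ++ ys) (fun m => m.1) := by
  induction ys using List.reverseRecOn generalizing xs with
  | nil =>
    have : PySem.List.sorted ([] : List (Int × String)) (fun m => m.1) = [] := rfl
    simp [this, mergeA_nil_right]
  | append_singleton ys y ih =>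
    rw [sorted_append_singleton, mergeA_insertBy, ih, ← sorted_append_singleton, List.append_assoc]

theorem sortA_eq (fuel : Nat) :
    ∀ ms : List (Int × String), ms ≠ [] → ms.length ≤ fuel →
      sortA fuel ms = PySem.List.sorted ms (fun m => m.1) := by
  induction fuel with
  | zero =>
    intro ms hne hle
    cases ms with
    | nil => exact absurd rfl hne
    | cons a t => simp at hle
  | succ fuel ih =>
    intro ms hne hle
    by_cases h1 : ms.length = 1
    · obtain ⟨a, rfl⟩ := List.length_eq_one_iff.mp h1
      rfl
    · have hlen1 : 1 ≤ ms.length := Nat.one_le_iff_ne_zero.mpr (by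
        intro h0; exact hne (List.eq_nil_of_length_eq_zero h0))
      have hlen2 : 2 ≤ ms.length := by omega
      have htl : (ms.take (ms.length / 2)).length = ms.length / 2 := by
        simp [List.length_take]; omega
      have hdl : (ms.drop (ms.length / 2)).length = ms.length - ms.length / 2 := by
        simp [List.length_drop]
      have hhalf1 : 1 ≤ ms.length / 2 := by omega
      have ht : sortA fuel (ms.take (ms.length / 2))
          = PySem.List.sorted (ms.take (ms.length / 2)) (fun m => m.1) := by
        apply ih
        · intro h; rw [h] at htl; simp at htl; omega
        · omega
      have hd : sortA fuel (ms.drop (ms.length / 2))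
          = PySem.List.sorted (ms.drop (ms.length / 2)) (fun m => m.1) := by
        apply ih
        · intro h; rw [h] at hdl; simp at hdl; omega
        · omega
      rw [sortA, if_neg h1, ht, hd, mergeA_sorted, List.take_append_drop]

-- ===== VERDICT (by name: the statement is the Claim_ definition above) =====
theorem solution_spec : Claim_equal_solution := by
  intro N all_members _ hpre
  unfold Spec_solution solution solution_alt
  rw [sortA_eq all_members.length all_members hpre (le_refl _)]
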